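-- pv_equiv track=rewrite | github.com/OmdenaAI/cairo-egypt-orphanage-well-being | src/tasks/task-9-develop-web-app/monitorApp/mlscript/utils/ava_prediction.py | remove_contradiction
-- ===== SOURCE A (Python) =====
-- def remove_contradiction(actions_list, contradiction_dict):
--     """
--     Remove contradictory actions from a list while preserving the order of actions based on probabilities.
--
--     Args:
--         actions_list (list): A list of actions sorted by probability, where higher probability actions come
--         first. contradiction_dict (dict): A dictionary where keys are actions, and values are lists of actions that
--         contradict them.
--
--     Returns:
--         list: A filtered list of actions without contradictory actions.
--     """
--     # Create a set to store actions to remove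
--     actions_to_remove = set()
--
--     # Create a dictionary to store the index of each action in the list
--     action_indices = {action: index for index, action in enumerate(actions_list)}
--
--     # Iterate over the list and update actions_to_remove
--     for action in actions_list:
--         # Get the list of contradictory actions for the current action, default to an empty list if not found
--         contradict_list = contradiction_dict.get(action, [])
--         for cont_action in contradict_list:
--             # Check if the contradictory action exists in the list of actions and has a lower index (higher
--             # probability)
--             if cont_action in action_indices and action_indices[cont_action] < action_indices[action]:
--                 # Mark the current action for removal
--                 actions_to_remove.add(action)
--             # Check if the contradictory action exists in the list of actions and has a higher index (lower
--             # probability)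
--             elif cont_action in action_indices and action_indices[cont_action] > action_indices[action]:
--                 # Mark the contradictory action for removal
--                 actions_to_remove.add(cont_action)
--
--     # Create a new list without the conflicting actions marked for removal
--     filtered_actions = [action for action in actions_list if action not in actions_to_remove]
--
--     return filtered_actions
-- ===== SOURCE B (Python) =====
-- def remove_contradiction(actions_list, contradiction_dict):
--     """Filter out every action that conflicts with a strictly higher-probability
--     (earlier-ranked) action, using a symmetric conflict map and one pass."""
--     # Symmetric adjacency: conflicts[x] = set of actions contradicting x.
--     conflicts = {}
--     for key, lst in contradiction_dict.items():
--         for other in lst: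
--             conflicts.setdefault(key, set()).add(other)
--             conflicts.setdefault(other, set()).add(key)
--
--     n = len(actions_list)
--     rank = {action: index for index, action in enumerate(actions_list)}
--
--     # Keep an action iff no conflicting action has a strictly smaller rank.
--     return [action for action in actions_list
--             if all(rank.get(other, n) >= rank[action]
--                    for other in conflicts.get(action, ()))]
-- ===== Notes on version B (the rewrite author's own statement) =====
-- stated objective: simpler
-- what changed: B builds a symmetric conflicts adjacency map once from contradiction_dict and then keeps an action iff no conflicting action has a strictly smaller rank, replacing A's two-branch marking loop over actions_list, its removal set and its second filter pass; Pre_ only excludes association lists with duplicate keys, which no Python dict argument can produce.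
import Mathlib
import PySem

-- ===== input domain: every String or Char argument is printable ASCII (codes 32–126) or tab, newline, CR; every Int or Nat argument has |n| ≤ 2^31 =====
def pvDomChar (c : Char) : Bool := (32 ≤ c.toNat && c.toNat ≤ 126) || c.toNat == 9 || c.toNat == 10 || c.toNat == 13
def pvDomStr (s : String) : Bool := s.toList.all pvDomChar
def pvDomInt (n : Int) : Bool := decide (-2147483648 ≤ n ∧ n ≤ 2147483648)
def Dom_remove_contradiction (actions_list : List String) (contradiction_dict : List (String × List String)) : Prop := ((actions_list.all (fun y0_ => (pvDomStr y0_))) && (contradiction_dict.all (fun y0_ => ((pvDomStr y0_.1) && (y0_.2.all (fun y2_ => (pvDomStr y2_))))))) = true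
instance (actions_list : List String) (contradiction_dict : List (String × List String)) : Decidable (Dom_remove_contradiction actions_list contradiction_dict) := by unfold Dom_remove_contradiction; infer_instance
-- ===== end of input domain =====

-- B re-implements A with a symmetric conflicts adjacency map and a single keep-iff-no-earlier-conflict
-- pass, replacing A's two-branch marking loop, removal set and second filter pass (objective: simpler).

-- helper shared by both ports: the dict comprehension {action: index for index, action in enumerate(actions_list)}
-- (it appears verbatim in both Pythons)
def pvIndexDict (actions_list : List String) : PySem.Dict String Int :=
  (PySem.List.enumerate actions_list).foldl (fun d p => d.insert p.2 p.1) PySem.Dict.empty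

-- ===== PORT A =====
def remove_contradiction (actions_list : List String) (contradiction_dict : List (String × List String)) : List String :=
  let action_indices : PySem.Dict String Int := pvIndexDict actions_list
  let actions_to_remove : PySem.Set String :=
    actions_list.foldl (fun s action =>
      ((PySem.Dict.mk contradiction_dict).getD action []).foldl (fun s cont_action =>
        if action_indices.contains cont_action &&
            decide (action_indices.getD cont_action 0 < action_indices.getD action 0) then
          PySem.Set.add s action
        else if action_indices.contains cont_action &&
            decide (action_indices.getD cont_action 0 > action_indices.getD action 0) then
          PySem.Set.add s cont_action
        else s) s) PySem.Set.empty
  actions_list.filter (fun action => !(PySem.Set.contains actions_to_remove action))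

-- ===== PORT B =====
def remove_contradiction_alt (actions_list : List String) (contradiction_dict : List (String × List String)) : List String :=
  let conflicts : PySem.Dict String (PySem.Set String) :=
    contradiction_dict.foldl (fun d p =>
      p.2.foldl (fun d other =>
        (d.modify p.1 PySem.Set.empty (fun s => PySem.Set.add s other)).modify other
          PySem.Set.empty (fun s => PySem.Set.add s p.1)) d)
      PySem.Dict.empty
  let n : Int := actions_list.length
  let rank : PySem.Dict String Int := pvIndexDict actions_list
  actions_list.filter (fun action =>
    (conflicts.getD action PySem.Set.empty).all (fun other =>
      decide (rank.getD other n ≥ rank.getD action 0)))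

-- ===== PRECONDITION & SPEC =====
-- Pre_ excludes association lists with duplicate keys: a Python dict argument can never contain them,
-- and on such lists A's first-match lookup vs B's items iteration make the behaviour accidental.
def Pre_remove_contradiction (_actions_list : List String) (contradiction_dict : List (String × List String)) : Prop :=
  (contradiction_dict.map Prod.fst).Nodup
instance (actions_list : List String) (contradiction_dict : List (String × List String)) : Decidable (Pre_remove_contradiction actions_list contradiction_dict) := by unfold Pre_remove_contradiction; infer_instance

def pvWitness_remove_contradiction : List String × (List (String × List String)) :=
  (["run", "sit", "walk"], [("run", ["sit"])])

def Spec_remove_contradiction (actions_list : List String) (contradiction_dict : List (String × List String)) (out : List String) : Prop := out = remove_contradiction_alt actions_list contradiction_dict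
instance (actions_list : List String) (contradiction_dict : List (String × List String)) (out : List String) : Decidable (Spec_remove_contradiction actions_list contradiction_dict out) := by unfold Spec_remove_contradiction; infer_instance

-- ===== CLAIM (what is proved, stated in full; the proofs are below) =====
def Claim_equal_remove_contradiction : Prop := ∀ (actions_list : List String) (contradiction_dict : List (String × List String)), Dom_remove_contradiction actions_list contradiction_dict → Pre_remove_contradiction actions_list contradiction_dict → Spec_remove_contradiction actions_list contradiction_dict (remove_contradiction actions_list contradiction_dict)

-- ===== LEMMAS AND PROOFS =====

lemma pvIdx_get?_not_mem (al : List String) (s : Int) (d : PySem.Dict String Int)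
    (v : String) (h : v ∉ al) :
    ((PySem.List.enumerate al s).foldl (fun d p => d.insert p.2 p.1) d).get? v = d.get? v := by
  induction al generalizing s d with
  | nil => simp [PySem.List.enumerate_nil]
  | cons x xs ih =>
      simp only [PySem.List.enumerate_cons, List.foldl_cons]
      have hvx : v ≠ x := by intro he; exact h (by simp [he])
      rw [ih _ _ (by intro hm; exact h (by simp [hm]))]
      exact PySem.Dict.get?_insert_of_ne _ _ hvx

lemma pvIdx_get?_mem (al : List String) (s : Int) (d : PySem.Dict String Int)
    (v : String) (h : v ∈ al) :
    ∃ i, ((PySem.List.enumerate al s).foldl (fun d p => d.insert p.2 p.1) d).get? v = some i ∧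
      s ≤ i ∧ i < s + al.length := by
  induction al generalizing s d with
  | nil => simp at h
  | cons x xs ih =>
      simp only [PySem.List.enumerate_cons, List.foldl_cons]
      by_cases hm : v ∈ xs
      · obtain ⟨i, hi, h1, h2⟩ := ih (s + 1) (d.insert x s) hm
        refine ⟨i, hi, by omega, ?_⟩
        simp only [List.length_cons] at *
        push_cast at *
        omega
      · have hvx : v = x := by rcases List.mem_cons.mp h with h | h; exact h; exact absurd h hm
        subst hvx
        rw [pvIdx_get?_not_mem xs (s + 1) _ v hm]
        refine ⟨s, PySem.Dict.get?_insert_self _ _ _, le_refl s, ?_⟩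
        simp only [List.length_cons]
        push_cast
        omega

lemma pv_mem_mark (P Q : String → String → Bool)
    (hPQ : ∀ a c, ¬(P a c = true ∧ Q a c = true)) (a : String) (cs : List String)
    (s0 : PySem.Set String) (x : String) :
    (x ∈ cs.foldl (fun s c => if P a c then PySem.Set.add s a
        else if Q a c then PySem.Set.add s c else s) s0) ↔
      x ∈ s0 ∨ ∃ c ∈ cs, (P a c = true ∧ x = a) ∨ (Q a c = true ∧ x = c) := by
  induction cs generalizing s0 with
  | nil => simp
  | cons c cs ih =>
      simp only [List.foldl_cons, List.exists_mem_cons_iff]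
      cases hP : P a c <;> cases hQ : Q a c
      · simp [ih]
      · simp [ih, PySem.Set.mem_add]; exact or_assoc
      · simp [ih, PySem.Set.mem_add]; exact or_assoc
      · exact absurd ⟨hP, hQ⟩ (hPQ a c)

lemma pv_mem_mark_all (P Q : String → String → Bool)
    (hPQ : ∀ a c, ¬(P a c = true ∧ Q a c = true)) (E : String → List String)
    (al : List String) (s0 : PySem.Set String) (x : String) :
    (x ∈ al.foldl (fun s a => (E a).foldl (fun s c => if P a c then PySem.Set.add s a
        else if Q a c then PySem.Set.add s c else s) s) s0) ↔
      x ∈ s0 ∨ ∃ a ∈ al, ∃ c ∈ E a, (P a c = true ∧ x = a) ∨ (Q a c = true ∧ x = c) := by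
  induction al generalizing s0 with
  | nil => simp
  | cons a al ih =>
      simp only [List.foldl_cons, ih, pv_mem_mark P Q hPQ, List.exists_mem_cons_iff]
      exact or_assoc

lemma pv_mem_conf_step (d : PySem.Dict String (PySem.Set String)) (a c v x : String) :
    (x ∈ ((d.modify a PySem.Set.empty (fun s => PySem.Set.add s c)).modify c
        PySem.Set.empty (fun s => PySem.Set.add s a)).getD v PySem.Set.empty) ↔
      x ∈ d.getD v PySem.Set.empty ∨ (v = a ∧ x = c) ∨ (v = c ∧ x = a) := by
  simp only [PySem.Dict.getD_modify]
  split_ifs with h1 h2 <;> simp_all [PySem.Set.mem_add]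

lemma pv_mem_conf_inner (a : String) (cs : List String)
    (d : PySem.Dict String (PySem.Set String)) (v x : String) :
    (x ∈ (cs.foldl (fun d other =>
        (d.modify a PySem.Set.empty (fun s => PySem.Set.add s other)).modify other
          PySem.Set.empty (fun s => PySem.Set.add s a)) d).getD v PySem.Set.empty) ↔
      x ∈ d.getD v PySem.Set.empty ∨ ∃ c ∈ cs, (v = a ∧ x = c) ∨ (v = c ∧ x = a) := by
  induction cs generalizing d with
  | nil => simp
  | cons c cs ih =>
      simp only [List.foldl_cons, ih, pv_mem_conf_step, List.exists_mem_cons_iff]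
      exact or_assoc

-- B's full conflicts map: x conflicts with v iff some dict entry says so, in either direction
lemma pv_mem_conf (cd : List (String × List String)) (v x : String) :
    (x ∈ (cd.foldl (fun d p =>
        p.2.foldl (fun d other =>
          (d.modify p.1 PySem.Set.empty (fun s => PySem.Set.add s other)).modify other
            PySem.Set.empty (fun s => PySem.Set.add s p.1)) d)
        PySem.Dict.empty).getD v PySem.Set.empty) ↔
      ∃ p ∈ cd, (v = p.1 ∧ x ∈ p.2) ∨ (x = p.1 ∧ v ∈ p.2) := by
  suffices h : ∀ d : PySem.Dict String (PySem.Set String), (x ∈ (cd.foldl (fun (d : PySem.Dict String (PySem.Set String)) (p : String × List String) =>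
        p.2.foldl (fun d other =>
          (d.modify p.1 PySem.Set.empty (fun s => PySem.Set.add s other)).modify other
            PySem.Set.empty (fun s => PySem.Set.add s p.1)) d) d).getD v PySem.Set.empty) ↔
      x ∈ d.getD v PySem.Set.empty ∨ ∃ p ∈ cd, (v = p.1 ∧ x ∈ p.2) ∨ (x = p.1 ∧ v ∈ p.2) by
    rw [h]; simp [PySem.Dict.getD_empty, PySem.Set.empty]
  induction cd with
  | nil => intro d; simp
  | cons p cd ih =>
      intro d
      simp only [List.foldl_cons, ih, pv_mem_conf_inner, List.mem_cons]
      constructor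
      · rintro ((h | ⟨c, hc, (hh | hh)⟩) | ⟨p', hp', hh⟩)
        · exact Or.inl h
        · exact Or.inr ⟨p, Or.inl rfl, Or.inl ⟨hh.1, hh.2 ▸ hc⟩⟩
        · exact Or.inr ⟨p, Or.inl rfl, Or.inr ⟨hh.2, hh.1 ▸ hc⟩⟩
        · exact Or.inr ⟨p', Or.inr hp', hh⟩
      · rintro (h | ⟨p', (hp' | hp'), hh⟩)
        · exact Or.inl (Or.inl h)
        · subst hp'
          rcases hh with ⟨hv, hx⟩ | ⟨hx, hv⟩
          · exact Or.inl (Or.inr ⟨x, hx, Or.inl ⟨hv, rfl⟩⟩)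
          · exact Or.inl (Or.inr ⟨v, hv, Or.inr ⟨rfl, hx⟩⟩)
        · exact Or.inr ⟨p', hp', hh⟩

-- A's dict.get on an association list with unique keys
lemma pv_mem_getD_mk (cd : List (String × List String))
    (hnd : (cd.map Prod.fst).Nodup) (a c : String) :
    (c ∈ (PySem.Dict.mk cd).getD a []) ↔ ∃ l, (a, l) ∈ cd ∧ c ∈ l := by
  have hkeys : (PySem.Dict.mk cd).keys.Nodup := hnd
  constructor
  · intro h
    rcases hv : (PySem.Dict.mk cd).get? a with _ | l
    · rw [PySem.Dict.getD_eq_get?_getD, hv] at h; simp at h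
    · rw [PySem.Dict.getD_eq_get?_getD, hv] at h
      exact ⟨l, PySem.Dict.mem_items_of_get?_eq_some _ hv, h⟩
  · rintro ⟨l, hl, hc⟩
    have := PySem.Dict.get?_of_mem_items (PySem.Dict.mk cd) (k := a) (v := l) hl hkeys
    rw [PySem.Dict.getD_eq_get?_getD, this]; exact hc

-- A removes exactly the actions that conflict with some strictly earlier-ranked action;
-- that is precisely what B's keep-predicate tests.
theorem remove_contradiction_spec : Claim_equal_remove_contradiction := by
  intro al cd _hdom hnd
  unfold Spec_remove_contradiction remove_contradiction remove_contradiction_alt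
  apply List.filter_congr
  intro a ha
  have hconta : ∀ v : String, (pvIndexDict al).contains v = true ↔ v ∈ al := by
    intro v
    rw [PySem.Dict.contains_eq_isSome_get?]
    constructor
    · intro h
      by_contra hm
      rw [show pvIndexDict al = ((PySem.List.enumerate al 0).foldl
        (fun d p => d.insert p.2 p.1) PySem.Dict.empty) from rfl,
        pvIdx_get?_not_mem al 0 _ v hm] at h
      simp [PySem.Dict.get?_empty] at h
    · intro hm
      obtain ⟨i, hi, _, _⟩ := pvIdx_get?_mem al 0 PySem.Dict.empty v hm
      rw [show pvIndexDict al = ((PySem.List.enumerate al 0).foldl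
        (fun d p => d.insert p.2 p.1) PySem.Dict.empty) from rfl, hi]
      rfl
  have hD : ∀ (v : String) (d0 : Int), v ∈ al →
      (pvIndexDict al).getD v d0 = (pvIndexDict al).getD v 0 ∧
      0 ≤ (pvIndexDict al).getD v 0 ∧ (pvIndexDict al).getD v 0 < (al.length : Int) := by
    intro v d0 hm
    obtain ⟨i, hi, h1, h2⟩ := pvIdx_get?_mem al 0 PySem.Dict.empty v hm
    have hi' : (pvIndexDict al).get? v = some i := hi
    rw [PySem.Dict.getD_eq_get?_getD, PySem.Dict.getD_eq_get?_getD, hi']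
    simpa using ⟨h1, by simpa using h2⟩
  have hDnot : ∀ (v : String) (d0 : Int), v ∉ al → (pvIndexDict al).getD v d0 = d0 := by
    intro v d0 hm
    have h0 : (pvIndexDict al).get? v = none := by
      rw [show pvIndexDict al = ((PySem.List.enumerate al 0).foldl
        (fun d p => d.insert p.2 p.1) PySem.Dict.empty) from rfl,
        pvIdx_get?_not_mem al 0 _ v hm]
      rfl
    rw [PySem.Dict.getD_eq_get?_getD, h0]; rfl
  have hPQ : ∀ y c : String,
      ¬(((pvIndexDict al).contains c &&
          decide ((pvIndexDict al).getD c 0 < (pvIndexDict al).getD y 0)) = true ∧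
        ((pvIndexDict al).contains c &&
          decide ((pvIndexDict al).getD c 0 > (pvIndexDict al).getD y 0)) = true) := by
    intro y c h
    simp only [Bool.and_eq_true, decide_eq_true_eq] at h
    omega
  obtain ⟨-, ha0, haN⟩ := hD a 0 ha
  have hbc : ∀ b c : Bool, (b = true ↔ c = false) → (!b) = c := by decide
  apply hbc
  rw [PySem.Set.contains_iff, List.all_eq_false]
  rw [pv_mem_mark_all _ _ hPQ (fun action => (PySem.Dict.mk cd).getD action []) al PySem.Set.empty a]
  simp only [decide_eq_true_eq, not_le]
  constructor
  · rintro (h | ⟨y, hy, c, hcE, hbranch⟩)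
    · simp [PySem.Set.empty] at h
    · obtain ⟨l, hl, hcl⟩ := (pv_mem_getD_mk cd hnd y c).mp hcE
      rcases hbranch with ⟨hP, hxa⟩ | ⟨hQ, hxa⟩
      · subst hxa
        simp only [Bool.and_eq_true, decide_eq_true_eq] at hP
        have hcal : c ∈ al := (hconta c).mp hP.1
        refine ⟨c, (pv_mem_conf cd a c).mpr ⟨(a, l), hl, Or.inl ⟨rfl, hcl⟩⟩, ?_⟩
        rw [(hD c _ hcal).1]
        omega
      · subst hxa
        simp only [Bool.and_eq_true, decide_eq_true_eq] at hQ
        refine ⟨y, (pv_mem_conf cd a y).mpr ⟨(y, l), hl, Or.inr ⟨rfl, hcl⟩⟩, ?_⟩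
        rw [(hD y _ hy).1]
        omega
  · rintro ⟨other, hother, hlt⟩
    have hoal : other ∈ al := by
      by_contra hno
      rw [hDnot other _ hno] at hlt
      omega
    have heq := (hD other (al.length : Int) hoal).1
    rw [heq] at hlt
    obtain ⟨p, hp, hcase⟩ := (pv_mem_conf cd a other).mp hother
    rcases hcase with ⟨hva, hxo⟩ | ⟨hxo, hva⟩
    · exact Or.inr ⟨a, ha, other,
        (pv_mem_getD_mk cd hnd a other).mpr ⟨p.2, hva ▸ hp, hxo⟩,
        Or.inl ⟨by simp [(hconta other).mpr hoal]; omega, rfl⟩⟩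
    · exact Or.inr ⟨other, hoal, a,
        (pv_mem_getD_mk cd hnd other a).mpr ⟨p.2, hxo ▸ hp, hva⟩,
        Or.inr ⟨by simp [(hconta a).mpr ha]; omega, rfl⟩⟩
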